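-- pv_equiv track=rewrite | github.com/NTurner20/Reddit-Daily-Challenges | boxfit.py | fit1
-- ===== SOURCE A (Python) =====
-- x_tot = 0
--
-- y_tot = 0
--
-- tot = 0
--
-- def fit1(X,Y,x,y):
-- 	for i in range(X+1):
-- 		if i*x <= X:
-- 			x_tot = i
-- 	for i in range(Y+1):
-- 		if i*y <= Y:
-- 			y_tot = i
-- 	tot = x_tot*y_tot
-- 	return tot
-- ===== SOURCE B (Python) =====
-- def fit1(X, Y, x, y):
--     x_tot = X // x if x > 0 else X
--     y_tot = Y // y if y > 0 else Y
--     return x_tot * y_tot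
-- ===== Notes on version B (the rewrite author's own statement) =====
-- stated objective: faster
-- what changed: Replaces the two O(X)/O(Y) linear scans for the largest multiple with closed-form floor division (X//x)*(Y//y), with the non-positive-divisor cases x<=0 / y<=0 giving X resp. Y directly.
import Mathlib
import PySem

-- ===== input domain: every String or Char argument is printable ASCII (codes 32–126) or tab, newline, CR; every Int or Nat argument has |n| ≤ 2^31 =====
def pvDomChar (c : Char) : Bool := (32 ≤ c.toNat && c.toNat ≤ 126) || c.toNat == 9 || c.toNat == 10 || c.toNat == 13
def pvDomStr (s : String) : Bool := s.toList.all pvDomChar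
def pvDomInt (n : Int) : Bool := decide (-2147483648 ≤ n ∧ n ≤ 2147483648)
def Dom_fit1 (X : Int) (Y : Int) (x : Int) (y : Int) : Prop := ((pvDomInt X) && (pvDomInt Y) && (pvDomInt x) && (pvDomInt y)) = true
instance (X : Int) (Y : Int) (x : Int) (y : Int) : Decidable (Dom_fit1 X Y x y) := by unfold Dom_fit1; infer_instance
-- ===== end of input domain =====

-- B replaces A's two linear scans with closed-form floor division (faster: O(1) vs O(X+Y)).

-- ===== PORT A =====
-- One Python for-loop 'for i in range(L+1): if i*s <= L: t = i'; the accumulator is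
-- Option Int, 'none' meaning 't' was never assigned (Python's UnboundLocalError, excluded by Pre_).
def fit1Loop (L : Int) (s : Int) : Option Int :=
  (PySem.List.pyRange 0 (L + 1) 1).foldl (fun acc i => if i * s ≤ L then some i else acc) none

def fit1 (X : Int) (Y : Int) (x : Int) (y : Int) : Int :=
  -- 'getD 0' is never reached under Pre_ (both loops assign since i = 0 satisfies the test)
  (fit1Loop X x).getD 0 * (fit1Loop Y y).getD 0

-- ===== PORT B =====
def fit1_alt (X : Int) (Y : Int) (x : Int) (y : Int) : Int :=
  (if 0 < x then PySem.Int.floordiv X x else X) * (if 0 < y then PySem.Int.floordiv Y y else Y)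

-- ===== PRECONDITION & SPEC =====
-- A raises UnboundLocalError when a loop body never runs, i.e. when X < 0 or Y < 0.
def Pre_fit1 (X : Int) (Y : Int) (x : Int) (y : Int) : Prop := 0 ≤ X ∧ 0 ≤ Y
instance (X : Int) (Y : Int) (x : Int) (y : Int) : Decidable (Pre_fit1 X Y x y) := by unfold Pre_fit1; infer_instance
def pvWitness_fit1 : Int × Int × Int × Int := (10, 10, 3, 2)

def Spec_fit1 (X : Int) (Y : Int) (x : Int) (y : Int) (out : Int) : Prop := out = fit1_alt X Y x y
instance (X : Int) (Y : Int) (x : Int) (y : Int) (out : Int) : Decidable (Spec_fit1 X Y x y out) := by unfold Spec_fit1; infer_instance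

-- ===== CLAIM (what is proved, stated in full; the proofs are below) =====
def Claim_equal_fit1 : Prop := ∀ (X : Int) (Y : Int) (x : Int) (y : Int), Dom_fit1 X Y x y → Pre_fit1 X Y x y → Spec_fit1 X Y x y (fit1 X Y x y)

-- ===== LEMMAS AND PROOFS =====

-- non-positive step: the test always passes, so the last index L wins
theorem fit1Loop_nonpos (L s : Int) (hL : 0 ≤ L) (hs : s ≤ 0) : fit1Loop L s = some L := by
  unfold fit1Loop
  rw [PySem.List.pyRange_one_succ_right hL, List.foldl_append]
  simp only [List.foldl_cons, List.foldl_nil]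
  rw [if_pos (le_trans (mul_nonpos_of_nonneg_of_nonpos hL hs) hL)]

-- positive step: the fold over range(0, n+1) keeps min n (L // s)
theorem fit1Loop_pos_aux (L s : Int) (hL : 0 ≤ L) (hs : 0 < s) (n : Nat) :
    (PySem.List.pyRange 0 ((n : Int) + 1) 1).foldl
      (fun acc i => if i * s ≤ L then some i else acc) none
      = some (min (n : Int) (PySem.Int.floordiv L s)) := by
  have hd : 0 ≤ PySem.Int.floordiv L s :=
    (PySem.Int.le_floordiv_iff_mul_le hs).mpr (by simpa using hL)
  induction n with
  | zero =>
    simp only [Nat.cast_zero, zero_add]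
    rw [show PySem.List.pyRange 0 1 1 = [0] by decide]
    simp only [List.foldl_cons, List.foldl_nil, zero_mul, if_pos hL]
    congr 1
    omega
  | succ n ih =>
    have h1 : (0 : Int) ≤ (n : Int) + 1 := by positivity
    rw [show ((n + 1 : Nat) : Int) + 1 = ((n : Int) + 1) + 1 by push_cast; ring,
        PySem.List.pyRange_one_succ_right h1, List.foldl_append, ih]
    simp only [List.foldl_cons, List.foldl_nil]
    have hiff : ((n : Int) + 1) * s ≤ L ↔ (n : Int) + 1 ≤ PySem.Int.floordiv L s :=
      (PySem.Int.le_floordiv_iff_mul_le hs).symm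
    split_ifs with h
    · rw [hiff] at h; congr 1; omega
    · rw [hiff] at h; congr 1; omega

theorem fit1Loop_eq (L s : Int) (hL : 0 ≤ L) :
    fit1Loop L s = some (if 0 < s then PySem.Int.floordiv L s else L) := by
  by_cases hs : 0 < s
  · have := fit1Loop_pos_aux L s hL hs L.toNat
    rw [if_pos hs]
    unfold fit1Loop
    rw [show ((L.toNat : Int)) = L by omega] at this
    rw [this]
    have hdle : PySem.Int.floordiv L s ≤ L := by
      rw [PySem.Int.floordiv_eq_ediv_of_pos hs]
      exact Int.ediv_le_self s hL
    congr 1; omega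
  · rw [if_neg hs]; exact fit1Loop_nonpos L s hL (by omega)

-- ===== VERDICT (by name: the statement is the Claim_ definition above) =====
theorem fit1_spec : Claim_equal_fit1 := by
  intro X Y x y _ hpre
  unfold Spec_fit1 fit1 fit1_alt
  rw [fit1Loop_eq X x hpre.1, fit1Loop_eq Y y hpre.2]
  rfl
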